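-- pv_equiv track=rewrite | github.com/Engineering-Capstone-TTE-Communications/TTE_Communications | Generators/Barker Sequences/barker_maker.py | find_barker
-- ===== SOURCE A (Python) =====
-- def validate_barker(sequence):
--   l = len(sequence)
--   if l < 2:
--     return
--
--   # notation for the math
--   # http://mathworld.wolfram.com/BarkerCode.html
--   for k in range(1,l):
--     sum = 0
--     for i in range(l-k):
--       sum = sum + sequence[i]*sequence[i+k]
--     if abs(sum) > 1:
--       return
--   return sequence
--
-- def binary_levelshifted(x):
--   y = list("{0:b}".format(x))
--   for i in range(len(y)):
--     y[i] = int(y[i])*2-1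
--   return y
--
-- def find_barker(length):
--   valid_barkers = []
--   for i in range(2**length-1,int(2**(length-1))-1,-1):
--     attempt = binary_levelshifted(i)
--     return_code = validate_barker(attempt)
--     if(return_code):
--       valid_barkers.append(return_code)
--   return valid_barkers
-- ===== SOURCE B (Python) =====
-- def find_barker(length):
--     # Branch-and-bound DFS: grow the sequence one element at a time, maintaining the
--     # partial autocorrelation sums, and prune any prefix whose partial sum for some
--     # shift can no longer come back within [-1, 1]; A brute-forces all candidates.
--     if length < 2:
--         return []
--     results = []
--
--     def extend(seq, corr):
--         # corr[k-1] = sum of the already-determined terms seq[i]*seq[i+k], k = 1..len(seq)-1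
--         m = len(seq)
--         if m == length:
--             results.append(seq)
--             return
--         for v in (1, -1):
--             new_corr = [(corr[k - 1] if k < m else 0) + seq[m - k] * v
--                         for k in range(1, m + 1)]
--             # length-(m+1) elements remain undecided: each still moves corr[k] by at most 1
--             if all(abs(c) <= length - m for c in new_corr):
--                 extend(seq + [v], new_corr)
--
--     extend([1], [])
--     return results
-- ===== Notes on version B (the rewrite author's own statement) =====
-- stated objective: faster
-- what changed: B replaces A's flat enumeration (count an integer down, decode it via binary string formatting, then run the full autocorrelation validator on each candidate) with a branch-and-bound DFS that grows the sequence element by element, maintains the partial autocorrelation sums incrementally, and prunes every prefix whose partial sum for some shift can no longer return within [-1,1]; the DFS branch order (1 before -1) reproduces A's descending-integer output order exactly.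
import Mathlib
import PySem

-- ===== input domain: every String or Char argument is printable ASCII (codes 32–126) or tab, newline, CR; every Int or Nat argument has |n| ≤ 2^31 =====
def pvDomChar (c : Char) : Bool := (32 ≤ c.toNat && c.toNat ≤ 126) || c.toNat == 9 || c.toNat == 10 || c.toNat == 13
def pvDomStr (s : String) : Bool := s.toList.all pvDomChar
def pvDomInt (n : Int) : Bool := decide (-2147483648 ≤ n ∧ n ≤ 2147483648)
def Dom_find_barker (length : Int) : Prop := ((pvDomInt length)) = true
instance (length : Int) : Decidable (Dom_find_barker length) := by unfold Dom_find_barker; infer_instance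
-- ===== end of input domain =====

-- B replaces A's flat enumerate-and-validate loop with a branch-and-bound DFS that maintains
-- partial autocorrelation sums and prunes prefixes that cannot recover; same output order.

-- ===== PORT A =====

-- inner early-return loop of validate_barker: 'for k in range(1,l): … if abs(sum)>1: return'
def pvValidateGo (sequence : List Int) : List Int → Option (List Int)
  | [] => some sequence
  | k :: ks =>
    let s := (PySem.List.pyRange 0 (PySem.List.len sequence - k) 1).foldl
      (fun sum i => sum + PySem.List.pyGetD sequence i 0 * PySem.List.pyGetD sequence (i + k) 0) 0
    if 1 < |s| then none else pvValidateGo sequence ks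

def validate_barker (sequence : List Int) : Option (List Int) :=
  if PySem.List.len sequence < 2 then none
  else pvValidateGo sequence (PySem.List.pyRange 1 (PySem.List.len sequence) 1)

-- '"{0:b}".format(x)' digit list; exact for x ≥ 0 (find_barker only feeds it nonnegative ints)
def pvNatBits (n : Nat) : List Int :=
  if h : n = 0 then [] else pvNatBits (n / 2) ++ [((n % 2 : Nat) : Int)]
decreasing_by exact Nat.div_lt_self (Nat.pos_of_ne_zero h) (by omega)

def binary_levelshifted (x : Int) : List Int :=
  (if x = 0 then [0] else pvNatBits x.toNat).map (fun d => d * 2 - 1)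

-- int(2**e): exact for every e — for e < 0 Python yields a float in (0,1) and int() truncates to 0
def pvIntPow2 (e : Int) : Int := if e < 0 then 0 else 2 ^ e.toNat

def find_barker (length : Int) : List (List Int) :=
  (PySem.List.pyRange (pvIntPow2 length - 1) (pvIntPow2 (length - 1) - 1) (-1)).foldl
    (fun valid_barkers i =>
      match validate_barker (binary_levelshifted i) with
      | some return_code => valid_barkers ++ [return_code]
      | none => valid_barkers) []

-- ===== PORT B =====

-- Source B's recursive 'extend': the fuel argument n is exactly length - len(seq) (the Python
-- recursion stops via the 'm == length' test; the invariant makes the two guards identical).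
-- The returned list is the 'results' accumulator in append order.
def pvExtend (length : Int) : Nat → List Int → List Int → List (List Int)
  | 0, seq, _corr => [seq]
  | n + 1, seq, corr =>
    ([1, -1] : List Int).foldl (fun acc v =>
      let m := PySem.List.len seq
      let new_corr := (PySem.List.pyRange 1 (m + 1) 1).map (fun k =>
        (if k < m then PySem.List.pyGetD corr (k - 1) 0 else 0)
          + PySem.List.pyGetD seq (m - k) 0 * v)
      if new_corr.all (fun c => decide (|c| ≤ length - m)) then
        acc ++ pvExtend length n (seq ++ [v]) new_corr
      else acc) []

def find_barker_alt (length : Int) : List (List Int) :=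
  if length < 2 then [] else pvExtend length (length - 1).toNat [1] []

-- ===== PRECONDITION & SPEC =====
-- A raises TypeError for length < 0 (2**length is a float handed to range); Pre_ excludes exactly that.
def Pre_find_barker (length : Int) : Prop := 0 ≤ length
instance (length : Int) : Decidable (Pre_find_barker length) := by unfold Pre_find_barker; infer_instance
def pvWitness_find_barker : Int := (3)

def Spec_find_barker (length : Int) (out : List (List Int)) : Prop := out = find_barker_alt length
instance (length : Int) (out : List (List Int)) : Decidable (Spec_find_barker length out) := by unfold Spec_find_barker; infer_instance

-- ===== CLAIM (what is proved, stated in full; the proofs are below) =====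
def Claim_equal_find_barker : Prop := ∀ (length : Int), Dom_find_barker length → Pre_find_barker length → Spec_find_barker length (find_barker length)

-- ===== LEMMAS AND PROOFS =====

-- shift-k autocorrelation of a (full or partial) sequence
def pvC (seq : List Int) (k : Nat) : Int :=
  ((List.range (seq.length - k)).map (fun i => seq.getD i 0 * seq.getD (i + k) 0)).sum

-- list of partial autocorrelation sums for shifts 1 .. len-1 (Source B's 'corr')
def pvCorrOf (seq : List Int) : List Int :=
  (List.range (seq.length - 1)).map (fun j => pvC seq (j + 1))

def pvSidelobesOk (seq : List Int) : Bool :=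
  (List.range (seq.length - 1)).all (fun j => decide (|pvC seq (j + 1)| ≤ 1))

-- all ±1 sequences of length n, 1-branch first (A's descending-integer candidate order)
def pvProds : Nat → List (List Int)
  | 0 => [[]]
  | n + 1 => (pvProds n).map (fun r => 1 :: r) ++ (pvProds n).map (fun r => -1 :: r)

-- ---------- A-side: the enumerated candidates are (pvProds n).map (1 :: ·) ----------

-- proof-side: n-bit binary digits of m, MSB first
def pvRawBits : Nat → Nat → List Int
  | 0, _ => []
  | n + 1, m => (if 2 ^ n ≤ m then (1 : Int) else 0) :: pvRawBits n (m % 2 ^ n)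

theorem pvRawBits_snoc (n : Nat) : ∀ m : Nat, m < 2 ^ (n + 1) →
    pvRawBits (n + 1) m = pvRawBits n (m / 2) ++ [((m % 2 : Nat) : Int)] := by
  induction n with
  | zero =>
    intro m hm
    interval_cases m <;> decide
  | succ n ih =>
    intro m hm
    have h1 : (2 ^ (n + 1) ≤ m) ↔ (2 ^ n ≤ m / 2) := by
      rw [Nat.le_div_iff_mul_le (by omega), pow_succ]
    have h3 : (m % 2 ^ (n + 1)) / 2 = m / 2 % 2 ^ n := by
      have := Nat.mod_mul_right_div_self m 2 (2 ^ n)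
      rwa [show 2 * 2 ^ n = 2 ^ (n + 1) by ring] at this
    have h4 : m % 2 ^ (n + 1) % 2 = m % 2 := Nat.mod_mod_of_dvd m ⟨2 ^ n, by ring⟩
    conv_lhs => rw [pvRawBits]
    rw [ih (m % 2 ^ (n + 1)) (Nat.mod_lt _ (by positivity)), h3, h4]
    conv_rhs => rw [pvRawBits]
    simp [List.cons_append, h1]

theorem pvNatBits_pow_add (n : Nat) : ∀ m : Nat, m < 2 ^ n →
    pvNatBits (2 ^ n + m) = 1 :: pvRawBits n m := by
  induction n with
  | zero =>
    intro m hm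
    interval_cases m
    rw [pvNatBits]; simp [pvNatBits, pvRawBits]
  | succ n ih =>
    intro m hm
    have hne : 2 ^ (n + 1) + m ≠ 0 := by positivity
    have hdiv : (2 ^ (n + 1) + m) / 2 = 2 ^ n + m / 2 := by
      rw [show 2 ^ (n + 1) + m = 2 * 2 ^ n + m by ring, Nat.mul_add_div (by omega)]
    have hmod : (2 ^ (n + 1) + m) % 2 = m % 2 := by
      rw [show (2:Nat) ^ (n + 1) = 2 * 2 ^ n by ring]
      omega
    rw [pvNatBits]
    simp only [hne, dite_false, hdiv, hmod]
    rw [ih (m / 2) (by omega), pvRawBits_snoc n m hm]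
    simp

-- level-shifted n-bit representation
def pvBitsS (n m : Nat) : List Int := (pvRawBits n m).map (fun d => d * 2 - 1)

theorem pvProds_eq (n : Nat) :
    ((List.range (2 ^ n)).reverse).map (pvBitsS n) = pvProds n := by
  induction n with
  | zero => decide
  | succ n ih =>
    have hb1 : ∀ m ∈ (List.range (2 ^ n)).reverse,
        (pvBitsS (n + 1) ∘ (2 ^ n + ·)) m = ((fun r => (1:Int) :: r) ∘ pvBitsS n) m := by
      intro m hm
      simp only [List.mem_reverse, List.mem_range] at hm
      simp [pvBitsS, pvRawBits, Nat.add_mod_left, Nat.mod_eq_of_lt hm]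
    have hb2 : ∀ m ∈ (List.range (2 ^ n)).reverse,
        pvBitsS (n + 1) m = ((fun r => (-1:Int) :: r) ∘ pvBitsS n) m := by
      intro m hm
      simp only [List.mem_reverse, List.mem_range] at hm
      simp [pvBitsS, pvRawBits, Nat.not_le.mpr hm, Nat.mod_eq_of_lt hm]
    rw [show 2 ^ (n + 1) = 2 ^ n + 2 ^ n by ring, List.range_add, List.reverse_append,
      List.map_append, ← List.map_reverse, List.map_map, List.map_congr_left hb1,
      List.map_congr_left hb2, ← List.map_map, ← List.map_map, ih]
    rfl

theorem pv_reverse_range (n : Nat) :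
    (List.range n).reverse = (List.range n).map (fun k => n - 1 - k) := by
  apply List.ext_getElem
  · simp
  · intro i h1 h2
    simp at h1 ⊢

theorem pv_hmap (n : Nat) :
    (List.range (2 ^ n)).map (fun k : Nat => binary_levelshifted ((2 : Int) ^ (n + 1) - 1 - (k : Int)))
      = (pvProds n).map (fun r => 1 :: r) := by
  have step1 : ∀ k ∈ List.range (2 ^ n),
      binary_levelshifted ((2 : Int) ^ (n + 1) - 1 - (k : Int)) = 1 :: pvBitsS n (2 ^ n - 1 - k) := by
    intro k hk
    simp only [List.mem_range] at hk
    have hcast : (2 : Int) ^ (n + 1) - 1 - (k : Int) = ((2 ^ n + (2 ^ n - 1 - k) : Nat) : Int) := by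
      have e : (2 : Int) ^ (n + 1) = 2 * ((2 ^ n : Nat) : Int) := by push_cast; ring
      rw [e]; omega
    rw [hcast]
    have hne : (2 ^ n + (2 ^ n - 1 - k) : Nat) ≠ 0 := by positivity
    unfold binary_levelshifted
    rw [if_neg (by exact_mod_cast hne), Int.toNat_natCast,
      pvNatBits_pow_add n _ (by have := Nat.one_le_two_pow (n := n); omega)]
    rfl
  rw [List.map_congr_left step1, ← pvProds_eq, pv_reverse_range, List.map_map, List.map_map]
  rfl

-- ---------- validator characterisation ----------

theorem pvValidateGo_eq (c : List Int) (ks : List Int) :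
    pvValidateGo c ks = if ks.all (fun k =>
        |((PySem.List.pyRange 0 (PySem.List.len c - k) 1).map
          (fun i => PySem.List.pyGetD c i 0 * PySem.List.pyGetD c (i + k) 0)).sum| ≤ 1)
      then some c else none := by
  induction ks with
  | nil => simp [pvValidateGo]
  | cons k ks ih =>
    rw [pvValidateGo]
    simp only [PySem.List.foldl_add, zero_add, List.all_cons]
    by_cases h : |((PySem.List.pyRange 0 (PySem.List.len c - k) 1).map
        (fun i => PySem.List.pyGetD c i 0 * PySem.List.pyGetD c (i + k) 0)).sum| ≤ 1
    · rw [if_neg (not_lt.mpr h), ih]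
      simp only [PySem.List.len_eq] at h
      simp [h]
    · rw [if_pos (not_le.mp h)]
      simp only [PySem.List.len_eq] at h
      simp [h]

theorem pvSum_eq (seq : List Int) (k : Nat) (hk : k ≤ seq.length) :
    ((PySem.List.pyRange 0 ((seq.length : Int) - (k : Int)) 1).map
      (fun i => PySem.List.pyGetD seq i 0 * PySem.List.pyGetD seq (i + (k : Int)) 0)).sum
      = pvC seq k := by
  have h1 : (seq.length : Int) - (k : Int) = ((seq.length - k : Nat) : Int) := by omega
  rw [h1, PySem.List.pyRange_zero_natCast, List.map_map]
  unfold pvC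
  congr 1
  apply List.map_congr_left
  intro j _
  simp only [Function.comp]
  rw [show (j : Int) + (k : Int) = ((j + k : Nat) : Int) by push_cast; ring,
    PySem.List.pyGetD_natCast, PySem.List.pyGetD_natCast]

theorem pvOk_eq (c : List Int) :
    (PySem.List.pyRange 1 (PySem.List.len c) 1).all (fun k =>
      |((PySem.List.pyRange 0 (PySem.List.len c - k) 1).map
        (fun i => PySem.List.pyGetD c i 0 * PySem.List.pyGetD c (i + k) 0)).sum| ≤ 1)
      = pvSidelobesOk c := by
  simp only [PySem.List.len_eq]
  rw [PySem.List.pyRange_one, show ((c.length : Int) - 1).toNat = c.length - 1 by omega,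
    List.all_map]
  unfold pvSidelobesOk
  rw [Bool.eq_iff_iff]
  simp only [List.all_eq_true, List.mem_range, Function.comp, decide_eq_true_eq]
  have key : ∀ j : Nat, j < c.length - 1 →
      ((PySem.List.pyRange 0 ((c.length : Int) - (1 + (j : Int))) 1).map
        (fun i => PySem.List.pyGetD c i 0 * PySem.List.pyGetD c (i + (1 + (j : Int))) 0)).sum
        = pvC c (j + 1) := by
    intro j hj
    have hc : (1 : Int) + (j : Int) = ((j + 1 : Nat) : Int) := by push_cast; ring
    rw [hc]
    exact pvSum_eq c (j + 1) (by omega)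
  constructor
  · intro H j hj; rw [← key j hj]; exact H j hj
  · intro H j hj; rw [key j hj]; exact H j hj

theorem validate_eq_ok (c : List Int) (h : 2 ≤ c.length) :
    validate_barker c = if pvSidelobesOk c then some c else none := by
  unfold validate_barker
  rw [if_neg (by simp [PySem.List.len_eq]; omega), pvValidateGo_eq, pvOk_eq]

theorem mem_pvProds_length (n : Nat) (r : List Int) (hr : r ∈ pvProds n) : r.length = n := by
  induction n generalizing r with
  | zero => simp [pvProds] at hr; simp [hr]
  | succ n ih =>
    simp only [pvProds, List.mem_append, List.mem_map] at hr
    rcases hr with ⟨r', hr', rfl⟩ | ⟨r', hr', rfl⟩ <;> simp [ih r' hr']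

theorem pvProds_pm (n : Nat) (r : List Int) (hr : r ∈ pvProds n) :
    ∀ x ∈ r, x = 1 ∨ x = -1 := by
  induction n generalizing r with
  | zero => simp [pvProds] at hr; simp [hr]
  | succ n ih =>
    simp only [pvProds, List.mem_append, List.mem_map] at hr
    rcases hr with ⟨r', hr', rfl⟩ | ⟨r', hr', rfl⟩ <;>
      · intro x hx
        rcases List.mem_cons.mp hx with rfl | hx'
        · simp
        · exact ih r' hr' x hx'

theorem pv_foldl_comp {α β γ : Type} (l : List α) (f : α → β) (g : γ → β → γ) (init : γ) :
    l.foldl (fun a x => g a (f x)) init = (l.map f).foldl g init := by rw [List.foldl_map]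

-- A (for length ≥ 2) filters the product-ordered candidate list by the sidelobe predicate
theorem pvA_filter (length : Int) (h2 : 2 ≤ length) :
    find_barker length
      = ((pvProds (length - 1).toNat).map (fun r => (1 : Int) :: r)).filter pvSidelobesOk := by
  have hn : ∃ n : Nat, 1 ≤ n ∧ length - 1 = (n : Int) := ⟨(length - 1).toNat, by omega, by omega⟩
  obtain ⟨n, hn1, hL⟩ := hn
  have hLt : length.toNat = n + 1 := by omega
  have hL1t : (length - 1).toNat = n := by omega
  unfold find_barker pvIntPow2
  rw [if_neg (by omega : ¬ length < 0), if_neg (by omega : ¬ length - 1 < 0), hLt, hL1t,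
    PySem.List.pyRange_neg_one]
  rw [show ((2:Int) ^ (n+1) - 1 - ((2:Int) ^ n - 1)).toNat = 2 ^ n by
    rw [show (2:Int) ^ (n+1) - 1 - ((2:Int) ^ n - 1) = ((2 ^ n : Nat) : Int) by push_cast; ring]
    exact Int.toNat_natCast _]
  rw [List.foldl_map,
    pv_foldl_comp (List.range (2 ^ n))
      (fun k : Nat => binary_levelshifted ((2:Int) ^ (n+1) - 1 - (k : Int)))
      (fun acc c => match validate_barker c with
        | some return_code => acc ++ [return_code]
        | none => acc) [],
    pv_hmap]
  have hbody : ∀ (acc : List (List Int)) (c : List Int), c ∈ (pvProds n).map (fun r => (1 : Int) :: r) →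
      (match validate_barker c with
        | some return_code => acc ++ [return_code]
        | none => acc)
      = if pvSidelobesOk c then acc ++ [c] else acc := by
    intro acc c hc
    obtain ⟨r, hr, rfl⟩ := List.mem_map.mp hc
    have hlen : 2 ≤ ((1 : Int) :: r).length := by simp [mem_pvProds_length n r hr]; omega
    rw [validate_eq_ok _ hlen]
    by_cases hok : pvSidelobesOk ((1 : Int) :: r) <;> simp [hok]
  rw [PySem.List.foldl_congr_mem _ _ _ _ hbody, PySem.List.foldl_append_if_eq_filter]
  simp

-- ---------- B-side: pvExtend computes the same filtered candidate list ----------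

theorem pvGetD_concat (l : List Int) (v d : Int) : (l ++ [v]).getD l.length d = v := by
  simp [List.getD_eq_getElem?_getD]

theorem pvC_snoc (seq : List Int) (v : Int) (k : Nat) (hk1 : 1 ≤ k) (hk2 : k ≤ seq.length) :
    pvC (seq ++ [v]) k = pvC seq k + seq.getD (seq.length - k) 0 * v := by
  unfold pvC
  have hlen : (seq ++ [v]).length - k = (seq.length - k) + 1 := by simp; omega
  rw [hlen, List.range_succ, List.map_append, List.sum_append]
  congr 1
  · congr 1
    apply List.map_congr_left
    intro i hi
    simp only [List.mem_range] at hi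
    rw [List.getD_append _ _ _ _ (by omega), List.getD_append _ _ _ _ (by omega)]
  · simp only [List.map_cons, List.map_nil, List.sum_cons, List.sum_nil, add_zero]
    rw [List.getD_append _ _ _ _ (by omega : seq.length - k < seq.length),
      show seq.length - k + k = seq.length by omega, pvGetD_concat]

theorem pvCorrOf_getD (seq : List Int) (j : Nat) (hj : j < seq.length - 1) :
    (pvCorrOf seq).getD j 0 = pvC seq (j + 1) := by
  unfold pvCorrOf
  rw [List.getD_eq_getElem?_getD, List.getElem?_map, List.getElem?_range hj]
  rfl

theorem pvNewCorr (seq : List Int) (v : Int) (hm : 1 ≤ seq.length) :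
    (PySem.List.pyRange 1 ((seq.length : Int) + 1) 1).map (fun k =>
      (if k < (seq.length : Int) then PySem.List.pyGetD (pvCorrOf seq) (k - 1) 0 else 0)
        + PySem.List.pyGetD seq ((seq.length : Int) - k) 0 * v)
      = pvCorrOf (seq ++ [v]) := by
  have hrhs : pvCorrOf (seq ++ [v])
      = (List.range seq.length).map (fun j => pvC (seq ++ [v]) (j + 1)) := by
    unfold pvCorrOf
    rw [show (seq ++ [v]).length - 1 = seq.length by simp]
  rw [PySem.List.pyRange_one, show ((seq.length : Int) + 1 - 1).toNat = seq.length by omega,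
    List.map_map, hrhs]
  apply List.map_congr_left
  intro j hj
  simp only [List.mem_range] at hj
  simp only [Function.comp]
  have e2 : (seq.length : Int) - (1 + (j : Int)) = ((seq.length - 1 - j : Nat) : Int) := by omega
  have esnoc := pvC_snoc seq v (j + 1) (by omega) (by omega)
  have eidx : seq.length - 1 - j = seq.length - (j + 1) := by omega
  by_cases hlt : (1 : Int) + (j : Int) < (seq.length : Int)
  · rw [if_pos hlt, show (1 : Int) + (j : Int) - 1 = ((j : Nat) : Int) by push_cast; ring,
      PySem.List.pyGetD_natCast, e2, PySem.List.pyGetD_natCast,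
      pvCorrOf_getD seq j (by omega), esnoc, eidx]
  · rw [if_neg hlt, e2, PySem.List.pyGetD_natCast]
    have hz : pvC seq (j + 1) = 0 := by
      unfold pvC
      rw [show seq.length - (j + 1) = 0 by omega]
      simp
    rw [esnoc, hz, eidx]

-- the port's new_corr expression (stated with PySem.List.len, as the port writes it)
theorem pvNewCorrLen (seq : List Int) (v : Int) (hm : 1 ≤ seq.length) :
    (PySem.List.pyRange 1 (PySem.List.len seq + 1) 1).map (fun k =>
      (if k < PySem.List.len seq then PySem.List.pyGetD (pvCorrOf seq) (k - 1) 0 else 0)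
        + PySem.List.pyGetD seq (PySem.List.len seq - k) 0 * v)
      = pvCorrOf (seq ++ [v]) := by
  simp only [PySem.List.len_eq]
  exact pvNewCorr seq v hm

theorem pvAbsSumLe (l : List Int) (h : ∀ x ∈ l, |x| ≤ 1) : |l.sum| ≤ (l.length : Int) := by
  induction l with
  | nil => simp
  | cons a t ih =>
    simp only [List.sum_cons, List.length_cons]
    have h1 := h a (by simp)
    have h2 := ih (fun x hx => h x (by simp [hx]))
    calc |a + t.sum| ≤ |a| + |t.sum| := abs_add_le _ _
      _ ≤ 1 + t.length := by omega
      _ = ((t.length : Int) + 1) := by ring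

theorem pvGetD_pm (xs : List Int) (i : Nat) (h : ∀ x ∈ xs, x = 1 ∨ x = -1) :
    xs.getD i 0 = 1 ∨ xs.getD i 0 = -1 ∨ xs.getD i 0 = 0 := by
  rw [List.getD_eq_getElem?_getD]
  cases hx : xs[i]? with
  | none => simp
  | some a =>
    rcases h a (List.mem_of_getElem? hx) with rfl | rfl <;> simp

theorem pvC_append_bound (c0 r : List Int) (k : Nat) (hk2 : k ≤ c0.length)
    (hpm : ∀ x ∈ c0 ++ r, x = 1 ∨ x = -1) :
    |pvC c0 k| ≤ |pvC (c0 ++ r) k| + r.length := by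
  have hsplit : (c0 ++ r).length - k = (c0.length - k) + r.length := by simp; omega
  have hfull : pvC (c0 ++ r) k = pvC c0 k +
      (((List.range r.length).map ((c0.length - k) + ·)).map
        (fun i => (c0 ++ r).getD i 0 * (c0 ++ r).getD (i + k) 0)).sum := by
    unfold pvC
    rw [hsplit, List.range_add, List.map_append, List.sum_append]
    congr 1
    congr 1
    apply List.map_congr_left
    intro i hi
    simp only [List.mem_range] at hi
    rw [List.getD_append _ _ _ _ (by omega), List.getD_append _ _ _ _ (by omega)]
  have hextra : |(((List.range r.length).map ((c0.length - k) + ·)).map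
      (fun i => (c0 ++ r).getD i 0 * (c0 ++ r).getD (i + k) 0)).sum| ≤ (r.length : Int) := by
    have hb := pvAbsSumLe (((List.range r.length).map ((c0.length - k) + ·)).map
      (fun i => (c0 ++ r).getD i 0 * (c0 ++ r).getD (i + k) 0)) ?_
    · simpa using hb
    · intro x hx
      obtain ⟨i, _, rfl⟩ := List.mem_map.mp hx
      rcases pvGetD_pm (c0 ++ r) i hpm with h1 | h1 | h1 <;>
        rcases pvGetD_pm (c0 ++ r) (i + k) hpm with h2 | h2 | h2 <;>
          rw [h1, h2] <;> norm_num
  have habs : |pvC (c0 ++ r) k -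
      (((List.range r.length).map ((c0.length - k) + ·)).map
        (fun i => (c0 ++ r).getD i 0 * (c0 ++ r).getD (i + k) 0)).sum|
      ≤ |pvC (c0 ++ r) k| +
        |(((List.range r.length).map ((c0.length - k) + ·)).map
          (fun i => (c0 ++ r).getD i 0 * (c0 ++ r).getD (i + k) 0)).sum| := by
    rw [sub_eq_add_neg]
    calc |pvC (c0 ++ r) k + -_| ≤ |pvC (c0 ++ r) k| + |-_| := abs_add_le _ _
      _ = _ := by rw [abs_neg]
  have hc0 : pvC c0 k = pvC (c0 ++ r) k -
      (((List.range r.length).map ((c0.length - k) + ·)).map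
        (fun i => (c0 ++ r).getD i 0 * (c0 ++ r).getD (i + k) 0)).sum := by omega
  rw [hc0]
  omega

theorem pvPrune (c0 r : List Int) (k : Nat) (hk1 : 1 ≤ k) (hk2 : k ≤ c0.length - 1)
    (hpm : ∀ x ∈ c0 ++ r, x = 1 ∨ x = -1)
    (hbig : (r.length : Int) + 1 < |pvC c0 k|) :
    pvSidelobesOk (c0 ++ r) = false := by
  unfold pvSidelobesOk
  refine List.all_eq_false.mpr ⟨k - 1, ?_, ?_⟩
  · simp only [List.mem_range, List.length_append]
    omega
  · have hb := pvC_append_bound c0 r k (by omega) hpm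
    simp only [show k - 1 + 1 = k by omega, decide_eq_true_eq, not_le]
    omega

theorem pvCorrOf_all_iff (c : List Int) (B : Int) :
    (pvCorrOf c).all (fun x => decide (|x| ≤ B)) = true
      ↔ ∀ k : Nat, 1 ≤ k → k ≤ c.length - 1 → |pvC c k| ≤ B := by
  unfold pvCorrOf
  simp only [List.all_map, List.all_eq_true, List.mem_range, Function.comp, decide_eq_true_eq]
  constructor
  · intro H k hk1 hk2
    have := H (k - 1) (by omega)
    rwa [show k - 1 + 1 = k by omega] at this
  · intro H j hj
    exact H (j + 1) (by omega) (by omega)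

theorem pvExtend_eq (n : Nat) : ∀ (length : Int) (seq : List Int),
    1 ≤ seq.length →
    length = (seq.length : Int) + (n : Int) →
    (∀ x ∈ seq, x = 1 ∨ x = -1) →
    (∀ k : Nat, 1 ≤ k → k ≤ seq.length - 1 → |pvC seq k| ≤ (n : Int) + 1) →
    pvExtend length n seq (pvCorrOf seq)
      = ((pvProds n).map (fun r => seq ++ r)).filter pvSidelobesOk := by
  induction n with
  | zero =>
    intro length seq hm hlen hpm hcorr
    have hok : pvSidelobesOk seq = true := by
      unfold pvSidelobesOk
      refine List.all_eq_true.mpr ?_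
      intro j hj
      simp only [List.mem_range] at hj
      exact decide_eq_true (by simpa using hcorr (j + 1) (by omega) (by omega))
    simp [pvExtend, pvProds, hok]
  | succ n ih =>
    intro length seq hm hlen hpm hcorr
    have hbound : length - (seq.length : Int) = (n : Int) + 1 := by push_cast at hlen ⊢; omega
    have key : ∀ v : Int, v = 1 ∨ v = -1 →
        (if (pvCorrOf (seq ++ [v])).all (fun c => decide (|c| ≤ (n : Int) + 1))
          then pvExtend length n (seq ++ [v]) (pvCorrOf (seq ++ [v])) else [])
        = ((pvProds n).map (fun r => (seq ++ [v]) ++ r)).filter pvSidelobesOk := by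
      intro v hv
      have hpm' : ∀ x ∈ seq ++ [v], x = 1 ∨ x = -1 := by
        intro x hx
        rcases List.mem_append.mp hx with hx' | hx'
        · exact hpm x hx'
        · simp only [List.mem_singleton] at hx'; subst hx'; exact hv
      by_cases hc : (pvCorrOf (seq ++ [v])).all (fun c => decide (|c| ≤ (n : Int) + 1)) = true
      · rw [if_pos hc]
        exact ih length (seq ++ [v]) (by simp)
          (by simp only [List.length_append, List.length_cons, List.length_nil]
              push_cast at hlen ⊢; omega)
          hpm' ((pvCorrOf_all_iff (seq ++ [v]) ((n : Int) + 1)).mp hc)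
      · rw [if_neg hc]
        symm
        rw [List.filter_eq_nil_iff]
        intro c hcmem
        obtain ⟨r, hr, rfl⟩ := List.mem_map.mp hcmem
        rw [pvCorrOf_all_iff] at hc
        push_neg at hc
        obtain ⟨k, hk1, hk2, hkbig⟩ := hc
        have hrpm : ∀ x ∈ (seq ++ [v]) ++ r, x = 1 ∨ x = -1 := by
          intro x hx
          rcases List.mem_append.mp hx with hx' | hx'
          · exact hpm' x hx'
          · exact pvProds_pm n r hr x hx'
        have := pvPrune (seq ++ [v]) r k hk1 hk2 hrpm
          (by rw [mem_pvProds_length n r hr]; omega)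
        rw [this]
        simp
    have e1 := key 1 (Or.inl rfl)
    have e2 := key (-1) (Or.inr rfl)
    have hboundLen : length - PySem.List.len seq = (n : Int) + 1 := by
      rw [PySem.List.len_eq]
      push_cast at hlen ⊢
      omega
    rw [pvExtend]
    simp only [List.foldl, List.nil_append, pvNewCorrLen seq 1 hm, pvNewCorrLen seq (-1) hm,
      hboundLen]
    rw [show pvProds (n + 1)
        = (pvProds n).map (fun r => 1 :: r) ++ (pvProds n).map (fun r => -1 :: r) from rfl,
      List.map_append, List.filter_append, List.map_map, List.map_map]
    have hcomp1 : ((fun r => seq ++ r) ∘ fun r => (1 : Int) :: r)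
        = (fun r => (seq ++ [(1 : Int)]) ++ r) := by
      funext r; simp
    have hcomp2 : ((fun r => seq ++ r) ∘ fun r => (-1 : Int) :: r)
        = (fun r => (seq ++ [(-1 : Int)]) ++ r) := by
      funext r; simp
    rw [hcomp1, hcomp2, ← e1, ← e2]
    by_cases hc2 : ((pvCorrOf (seq ++ [-1])).all fun c => decide (|c| ≤ (n : Int) + 1)) = true <;>
      simp [hc2]

-- ---------- assembly ----------

theorem pv_main : ∀ (length : Int), 0 ≤ length → find_barker length = find_barker_alt length := by
  intro length hpre
  by_cases h2 : length < 2
  · have h : length = 0 ∨ length = 1 := by omega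
    have e0 : pvNatBits 0 = [] := by rw [pvNatBits]; simp
    have e1 : pvNatBits 1 = [1] := by rw [pvNatBits]; simp [e0]
    rcases h with h | h <;> subst h <;>
      simp [find_barker, find_barker_alt, pvIntPow2, PySem.List.pyRange_neg_one,
        binary_levelshifted, validate_barker, e1]
  · replace h2 : 2 ≤ length := by omega
    have hmain := pvExtend_eq (length - 1).toNat length [1] (by simp)
      (by simp only [List.length_cons, List.length_nil]; omega)
      (by simp)
      (by intro k hk1 hk2; simp only [List.length_cons, List.length_nil] at hk2; omega)
    unfold find_barker_alt
    rw [if_neg (by omega), pvA_filter length h2,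
      show pvExtend length (length - 1).toNat [1] []
        = pvExtend length (length - 1).toNat [1] (pvCorrOf [1]) from rfl,
      hmain]
    simp

-- ===== VERDICT =====
theorem find_barker_spec : Claim_equal_find_barker := by
  intro length _ hpre
  unfold Spec_find_barker
  exact pv_main length hpre
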